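-- pv_equiv track=rewrite | github.com/Gs-Linguashop/phonograph-input | main.py | append_spellings
-- ===== SOURCE A (Python) =====
-- def append_spellings(line, char_entry_dict):
--     if '\t' in line: return [line] # spelling already exists
--     line_split = line.split('\t')
--     spellings = [line + '\t']
--     for char in line:
--         update_spellings = []
--         for char_spelling in char_entry_dict.get(char,[]):
--             for spelling in spellings:
--                 if spelling[-1] == '\t': update_spellings.append(spelling + char_spelling)
--                 else: update_spellings.append(spelling + ' ' + char_spelling)
--         spellings = update_spellings
--     return spellings
-- ===== SOURCE B (Python) =====
-- def append_spellings(line, char_entry_dict):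
--     if '\t' in line:
--         return [line]
--     opts = [char_entry_dict.get(c, []) for c in line]
--     total = 1
--     for o in opts:
--         total *= len(o)
--     result = []
--     for k in range(total):
--         s = line + '\t'
--         idx = k
--         for o in opts:
--             piece = o[idx % len(o)]
--             idx //= len(o)
--             s = s + piece if s[-1] == '\t' else s + ' ' + piece
--         result.append(s)
--     return result
-- ===== Notes on version B (the rewrite author's own statement) =====
-- stated objective: alternative
-- what changed: Replaces A's repeated rebuilding of the whole spellings list per character (options outer, existing spellings inner) by mixed-radix index enumeration: compute the combination count, then for each index k decode one digit per character (first character = fastest-varying digit) and build that single output string directly.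
import Mathlib
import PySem

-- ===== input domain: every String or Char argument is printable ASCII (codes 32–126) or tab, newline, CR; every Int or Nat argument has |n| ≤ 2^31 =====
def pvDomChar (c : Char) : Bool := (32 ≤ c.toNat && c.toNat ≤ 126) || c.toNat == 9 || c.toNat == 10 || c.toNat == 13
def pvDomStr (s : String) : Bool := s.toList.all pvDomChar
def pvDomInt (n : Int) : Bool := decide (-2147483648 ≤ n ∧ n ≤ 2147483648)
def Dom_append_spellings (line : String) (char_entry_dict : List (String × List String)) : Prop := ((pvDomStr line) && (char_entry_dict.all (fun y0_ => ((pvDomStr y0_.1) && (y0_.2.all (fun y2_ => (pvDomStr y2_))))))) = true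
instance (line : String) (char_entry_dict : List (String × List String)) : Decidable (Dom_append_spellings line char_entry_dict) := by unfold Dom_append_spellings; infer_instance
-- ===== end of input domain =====

-- B replaces A's per-character rebuilding of the whole spellings list by mixed-radix
-- index enumeration of the combinations (objective: alternative; same asymptotic cost).


-- shared by both ports: append one spelling word w to the accumulated string sp,
-- with a space unless sp ends in '\t' (exactly Python's `spelling[-1] == '\t'` test;
-- sp is never empty where either Python evaluates it)
def pvJoin (sp : List Char) (w : String) : List Char :=
  if PySem.List.pyGet? sp (-1) = some '\t' then sp ++ w.toList else sp ++ ' ' :: w.toList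

-- ===== PORT A =====
-- strings are handled on the List Char side (PySem convention); results rebuilt with String.ofList
def append_spellings (line : String) (char_entry_dict : List (String × List String)) : List String :=
  if PySem.Str.isIn "\t" line then [line]  -- spelling already exists
  else
    -- (A's `line_split = line.split('\t')` is dead code: never used)
    let init : List Char := line.toList ++ ['\t']
    let final : List (List Char) :=
      line.toList.foldl
        (fun spellings char =>
          (PySem.Dict.getD (PySem.Dict.mk char_entry_dict) (String.ofList [char]) []).foldl
            (fun update_spellings char_spelling =>
              spellings.foldl
                (fun u spelling => u ++ [pvJoin spelling char_spelling])
                update_spellings)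
            [])
        [init]
    final.map String.ofList

-- ===== PORT B =====
def append_spellings_alt (line : String) (char_entry_dict : List (String × List String)) : List String :=
  if PySem.Str.isIn "\t" line then [line]
  else
    let opts : List (List String) :=
      line.toList.map (fun c => PySem.Dict.getD (PySem.Dict.mk char_entry_dict) (String.ofList [c]) [])
    let total : Nat := opts.foldl (fun t o => t * o.length) 1
    (List.range total).map (fun k =>
      String.ofList
        (opts.foldl
          (fun (st : List Char × Nat) o =>
            (pvJoin st.1 (o.getD (st.2 % o.length) ""), st.2 / o.length))
          (line.toList ++ ['\t'], k)).1)

-- ===== PRECONDITION & SPEC =====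
def Spec_append_spellings (line : String) (char_entry_dict : List (String × List String)) (out : List String) : Prop := out = append_spellings_alt line char_entry_dict
instance (line : String) (char_entry_dict : List (String × List String)) (out : List String) : Decidable (Spec_append_spellings line char_entry_dict out) := by unfold Spec_append_spellings; infer_instance

-- ===== CLAIM (what is proved, stated in full; the proofs are below) =====
def Claim_equal_append_spellings : Prop := ∀ (line : String) (char_entry_dict : List (String × List String)), Dom_append_spellings line char_entry_dict → Spec_append_spellings line char_entry_dict (append_spellings line char_entry_dict)

-- ===== LEMMAS AND PROOFS =====

-- proof-side abbreviations for the two loop bodies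
def pvStepA (spellings : List (List Char)) (o : List String) : List (List Char) :=
  o.flatMap (fun w => spellings.map (fun sp => pvJoin sp w))

def pvStepB (st : List Char × Nat) (o : List String) : List Char × Nat :=
  (pvJoin st.1 (o.getD (st.2 % o.length) ""), st.2 / o.length)

def pvProd (opts : List (List String)) : Nat := (opts.map List.length).prod

theorem pvProd_cons (o : List String) (os : List (List String)) :
    pvProd (o :: os) = o.length * pvProd os := by simp [pvProd]

theorem pvProd_append_singleton (os : List (List String)) (o : List String) :
    pvProd (os ++ [o]) = pvProd os * o.length := by simp [pvProd]

theorem pvTotal_eq_pvProd (opts : List (List String)) (a : Nat) :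
    opts.foldl (fun t o => t * o.length) a = a * pvProd opts := by
  induction opts generalizing a with
  | nil => simp [pvProd]
  | cons o os ih => simp only [List.foldl_cons, ih, pvProd_cons]; ring

theorem pvBfold_snd (os : List (List String)) (init : List Char) (k : Nat) :
    (os.foldl pvStepB (init, k)).2 = k / pvProd os := by
  induction os generalizing init k with
  | nil => simp [pvProd]
  | cons o rest ih =>
      simp only [List.foldl_cons, pvStepB, ih, pvProd_cons, Nat.div_div_eq_div_mul,
        Nat.mul_comm]

theorem pvBfold_fst_mod (os : List (List String)) (init : List Char) (k : Nat) :
    (os.foldl pvStepB (init, k)).1 = (os.foldl pvStepB (init, k % pvProd os)).1 := by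
  induction os generalizing init k with
  | nil => rfl
  | cons o rest ih =>
      simp only [List.foldl_cons, pvStepB, pvProd_cons]
      rw [Nat.mod_mod_of_dvd k ⟨pvProd rest, rfl⟩, Nat.mod_mul_right_div_self]
      exact ih _ (k / o.length)

-- splitting range (t*L) into L blocks of length t
theorem pvRange_mul_map {β : Type} (t L : Nat) (g : Nat → Nat → β) :
    (List.range (t * L)).map (fun k => g (k % t) (k / t)) =
      (List.range L).flatMap (fun q => (List.range t).map (fun r => g r q)) := by
  induction L with
  | zero => simp
  | succ L ih =>
      rw [Nat.mul_succ, List.range_add, List.map_append, List.map_map, ih,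
          List.range_succ, List.flatMap_append]
      congr 1
      simp only [List.flatMap_cons, List.flatMap_nil, List.append_nil]
      refine List.map_congr_left (fun r hr => ?_)
      have hrt : r < t := List.mem_range.mp hr
      have ht : 0 < t := by omega
      have h1 : (t * L + r) % t = r := by
        rw [Nat.mul_add_mod, Nat.mod_eq_of_lt hrt]
      have h2 : (t * L + r) / t = L := by
        rw [Nat.mul_add_div ht, Nat.div_eq_of_lt hrt]; omega
      simp [h1, h2]

-- flatMap over a list equals flatMap over its index range
theorem pvFlatMap_range {β : Type} (o : List String) (h : String → List β) :
    (List.range o.length).flatMap (fun q => h (o.getD q "")) = o.flatMap h := by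
  induction o with
  | nil => simp
  | cons x xs ih =>
      rw [List.length_cons, List.range_succ_eq_map, List.flatMap_cons, List.flatMap_map]
      simp only [List.getD_cons_zero, List.getD_cons_succ]
      rw [ih, List.flatMap_cons]

-- the core equivalence: A's left fold over opts equals B's index enumeration
theorem pvCore (opts : List (List String)) (init : List Char) :
    opts.foldl pvStepA [init] =
      (List.range (pvProd opts)).map (fun k => (opts.foldl pvStepB (init, k)).1) := by
  induction opts using List.reverseRecOn with
  | nil => simp [pvProd]
  | append_singleton os o ih =>
      rw [List.foldl_append, List.foldl_cons, List.foldl_nil, ih, pvProd_append_singleton]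
      have hRHS : ∀ k : Nat,
          ((os ++ [o]).foldl pvStepB (init, k)).1 =
            pvJoin ((os.foldl pvStepB (init, k % pvProd os)).1)
              (o.getD (k / pvProd os % o.length) "") := by
        intro k
        rw [List.foldl_append, List.foldl_cons, List.foldl_nil]
        show (pvStepB (os.foldl pvStepB (init, k)) o).1 = _
        rw [pvStepB, pvBfold_snd, pvBfold_fst_mod]
      simp only [hRHS]
      rw [pvRange_mul_map (pvProd os) o.length
            (fun r q => pvJoin ((os.foldl pvStepB (init, r)).1)
              (o.getD (q % o.length) ""))]
      rw [List.flatMap_def]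
      rw [show (List.range o.length).map
            (fun q => (List.range (pvProd os)).map
              (fun r => pvJoin ((os.foldl pvStepB (init, r)).1)
                (o.getD (q % o.length) ""))) =
          (List.range o.length).map
            (fun q => (List.range (pvProd os)).map
              (fun r => pvJoin ((os.foldl pvStepB (init, r)).1)
                (o.getD q ""))) from
        List.map_congr_left (fun q hq => by
          rw [Nat.mod_eq_of_lt (List.mem_range.mp hq)])]
      rw [← List.flatMap_def,
          pvFlatMap_range o
            (fun w => (List.range (pvProd os)).map
              (fun r => pvJoin ((os.foldl pvStepB (init, r)).1) w))]
      simp [pvStepA, List.map_map, Function.comp_def]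

-- A's concrete nested foldl-with-append loops equal pvStepA
theorem pvStepA_eq (spellings : List (List Char)) (o : List String) :
    o.foldl
      (fun update_spellings char_spelling =>
        spellings.foldl (fun u spelling => u ++ [pvJoin spelling char_spelling])
          update_spellings)
      [] = pvStepA spellings o := by
  have hinner : ∀ (w : String) (u0 : List (List Char)),
      spellings.foldl (fun u sp => u ++ [pvJoin sp w]) u0
        = u0 ++ spellings.map (fun sp => pvJoin sp w) := by
    intro w u0
    induction spellings generalizing u0 with
    | nil => simp
    | cons s ss ih => simp [List.foldl_cons, ih]
  have houter : ∀ (acc : List (List Char)),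
      o.foldl
        (fun update_spellings char_spelling =>
          spellings.foldl (fun u spelling => u ++ [pvJoin spelling char_spelling])
            update_spellings)
        acc = acc ++ pvStepA spellings o := by
    intro acc
    induction o generalizing acc with
    | nil => simp [pvStepA]
    | cons w ws ih =>
        rw [List.foldl_cons, hinner, ih]
        simp [pvStepA, List.append_assoc, List.flatMap_def]
  simpa using houter []

-- ===== VERDICT (by name: the statement is the Claim_ definition above) =====
theorem append_spellings_spec : Claim_equal_append_spellings := by
  intro line char_entry_dict _
  unfold Spec_append_spellings append_spellings append_spellings_alt
  by_cases h : PySem.Str.isIn "\t" line = true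
  · rw [if_pos h, if_pos h]
  · rw [if_neg h, if_neg h]
    simp only []
    rw [pvTotal_eq_pvProd, Nat.one_mul]
    have hfold :
        line.toList.foldl
          (fun spellings char =>
            (PySem.Dict.getD (PySem.Dict.mk char_entry_dict) (String.ofList [char]) []).foldl
              (fun update_spellings char_spelling =>
                spellings.foldl
                  (fun u spelling => u ++ [pvJoin spelling char_spelling])
                  update_spellings)
              [])
          [line.toList ++ ['\t']]
          = (line.toList.map
              (fun c => PySem.Dict.getD (PySem.Dict.mk char_entry_dict) (String.ofList [c]) [])).foldl
              pvStepA [line.toList ++ ['\t']] := by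
      rw [List.foldl_map]
      exact List.foldl_ext _ _ _ (fun sps c hc => pvStepA_eq sps _)
    rw [hfold, pvCore, List.map_map]
    rfl
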